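-- pv_equiv track=rewrite | github.com/AzizMel/3CNF-Code-Solver | mpi/run_cnf_mpi.py | clause_mask
-- ===== SOURCE A (Python) =====
-- from typing import Dict, List, Tuple, Optional
--
-- LITERAL_MASK: Dict[str, int] = {
--     "x1":  0b11110000, "-x1": 0b00001111,
--     "x2":  0b11001100, "-x2": 0b00110011,
--     "x3":  0b10101010, "-x3": 0b01010101,
-- }
--
-- def clause_mask(clause: List[str]) -> int:
--     """Bitmask (8 bits) of assignments that satisfy the clause."""
--     m = 0
--     for lit in clause:
--         try:
--             m |= LITERAL_MASK[lit]
--         except KeyError: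
--             raise ValueError(f"Unknown literal: {lit}")
--     return m & 0xFF
-- ===== SOURCE B (Python) =====
-- VALID = ("x1", "-x1", "x2", "-x2", "x3", "-x3")
--
-- def _sat(lit, i):
--     """Truth of literal `lit` under assignment i (bit 2 = x1, bit 1 = x2, bit 0 = x3)."""
--     if lit == "x1":
--         return (i >> 2) & 1 == 1
--     if lit == "-x1":
--         return (i >> 2) & 1 == 0
--     if lit == "x2":
--         return (i >> 1) & 1 == 1
--     if lit == "-x2":
--         return (i >> 1) & 1 == 0
--     if lit == "x3":
--         return i & 1 == 1
--     return i & 1 == 0  # "-x3"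
--
-- def clause_mask(clause):
--     """Bitmask (8 bits) of assignments that satisfy the clause, by truth-table enumeration."""
--     for lit in clause:
--         if lit not in VALID:
--             raise ValueError(f"Unknown literal: {lit}")
--     m = 0
--     for i in range(8):
--         if any(_sat(lit, i) for lit in clause):
--             m |= 1 << i
--     return m
-- ===== Notes on version B (the rewrite author's own statement) =====
-- stated objective: alternative
-- what changed: B evaluates the clause as a truth table over the 8 assignments (setting bit i when some literal is true under assignment i) instead of ORing precomputed per-literal masks; it validates literals up front and raises the same ValueError on unknown ones.
import Mathlib
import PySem

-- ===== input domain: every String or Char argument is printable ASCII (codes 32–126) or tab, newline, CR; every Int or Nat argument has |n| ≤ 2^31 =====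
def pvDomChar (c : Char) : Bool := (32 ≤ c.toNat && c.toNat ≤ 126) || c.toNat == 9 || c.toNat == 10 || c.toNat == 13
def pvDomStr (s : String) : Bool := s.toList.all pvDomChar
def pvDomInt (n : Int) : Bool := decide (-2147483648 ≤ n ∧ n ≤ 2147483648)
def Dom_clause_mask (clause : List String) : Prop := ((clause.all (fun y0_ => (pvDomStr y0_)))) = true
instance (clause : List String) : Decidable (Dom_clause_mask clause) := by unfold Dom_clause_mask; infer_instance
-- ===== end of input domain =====

-- B replaces the mask-OR fold by an 8-row truth-table evaluation (same cost, different algorithm).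

-- ===== PORT A =====
def LITERAL_MASK : PySem.Dict String Int :=
  PySem.Dict.ofList [("x1", 240), ("-x1", 15), ("x2", 204), ("-x2", 51), ("x3", 170), ("-x3", 85)]

-- Python raises ValueError (from the dict KeyError) on an unknown literal; Pre_ excludes
-- exactly those inputs, so getD's default 0 is never reached inside Pre_.
def clause_mask (clause : List String) : Int :=
  PySem.Int.band
    (clause.foldl (fun m lit => PySem.Int.bor m (PySem.Dict.getD LITERAL_MASK lit 0)) 0) 255

-- ===== PORT B =====
def VALID : List String := ["x1", "-x1", "x2", "-x2", "x3", "-x3"]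

def satLit (lit : String) (i : Int) : Bool :=
  if lit = "x1" then PySem.Int.band (i >>> (2 : Nat)) 1 == 1
  else if lit = "-x1" then PySem.Int.band (i >>> (2 : Nat)) 1 == 0
  else if lit = "x2" then PySem.Int.band (i >>> (1 : Nat)) 1 == 1
  else if lit = "-x2" then PySem.Int.band (i >>> (1 : Nat)) 1 == 0
  else if lit = "x3" then PySem.Int.band i 1 == 1
  else PySem.Int.band i 1 == 0  -- "-x3"

-- the validity loop: Python raises ValueError on an unknown literal (outside Pre_); the port
-- returns 0 there.  '1 << i' is ported as '1 <<< i.toNat' (i ranges over 0..7, so i.toNat = i).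
def clause_mask_alt (clause : List String) : Int :=
  if clause.all (fun lit => decide (lit ∈ VALID)) then
    (PySem.List.pyRange 0 8 1).foldl
      (fun m i => if clause.any (fun lit => satLit lit i) then PySem.Int.bor m (1 <<< i.toNat) else m) 0
  else 0

-- ===== PRECONDITION & SPEC =====
-- Pre_ excludes exactly the inputs with a literal outside the six known ones, where the
-- Python A raises ValueError (and the Python B raises the same ValueError).
def Pre_clause_mask (clause : List String) : Prop := ∀ lit ∈ clause, lit ∈ VALID
instance (clause : List String) : Decidable (Pre_clause_mask clause) := by unfold Pre_clause_mask; infer_instance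
def pvWitness_clause_mask : List String := ["x1", "-x3"]

def Spec_clause_mask (clause : List String) (out : Int) : Prop := out = clause_mask_alt clause
instance (clause : List String) (out : Int) : Decidable (Spec_clause_mask clause out) := by unfold Spec_clause_mask; infer_instance

-- ===== CLAIM (what is proved, stated in full; the proofs are below) =====
def Claim_equal_clause_mask : Prop := ∀ (clause : List String), Dom_clause_mask clause → Pre_clause_mask clause → Spec_clause_mask clause (clause_mask clause)

-- ===== LEMMAS AND PROOFS =====

-- Both ports, on Pre_, are functions of the six membership booleans of the clause:
-- AF abstracts A's OR-of-masks, BF abstracts B's truth-table fold; they agree on all 64 cases.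

def AFn (b1 b2 b3 b4 b5 b6 : Bool) : Nat :=
  (cond b1 240 0) ||| (cond b2 15 0) ||| (cond b3 204 0) ||| (cond b4 51 0) |||
  (cond b5 170 0) ||| (cond b6 85 0)

def AF (b1 b2 b3 b4 b5 b6 : Bool) : Int := PySem.Int.band ((AFn b1 b2 b3 b4 b5 b6 : Nat) : Int) 255

def BF (b1 b2 b3 b4 b5 b6 : Bool) : Int :=
  ([0, 1, 2, 3, 4, 5, 6, 7] : List Int).foldl
    (fun m i => if (b1 && satLit "x1" i || b2 && satLit "-x1" i || b3 && satLit "x2" i ||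
                    b4 && satLit "-x2" i || b5 && satLit "x3" i || b6 && satLit "-x3" i)
                then PySem.Int.bor m (1 <<< i.toNat) else m) 0

def MN (clause : List String) : Nat :=
  AFn (decide ("x1" ∈ clause)) (decide ("-x1" ∈ clause)) (decide ("x2" ∈ clause))
      (decide ("-x2" ∈ clause)) (decide ("x3" ∈ clause)) (decide ("-x3" ∈ clause))

theorem AF_eq_BF : ∀ b1 b2 b3 b4 b5 b6 : Bool, AF b1 b2 b3 b4 b5 b6 = BF b1 b2 b3 b4 b5 b6 := by
  decide

theorem lor_left_comm (a b c : Nat) : a ||| (b ||| c) = b ||| (a ||| c) := by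
  rw [← Nat.lor_assoc, Nat.lor_comm a b, Nat.lor_assoc]

def pnat (l : String) : Nat :=
  if l = "x1" then 240 else if l = "-x1" then 15 else if l = "x2" then 204
  else if l = "-x2" then 51 else if l = "x3" then 170 else 85

theorem getD_eq (l : String) (hl : l ∈ VALID) :
    PySem.Dict.getD LITERAL_MASK l 0 = ((pnat l : Nat) : Int) := by
  fin_cases hl <;> decide

theorem A_fold (cs : List String) (hpre : ∀ l ∈ cs, l ∈ VALID) (k : Nat) :
    cs.foldl (fun m lit => PySem.Int.bor m (PySem.Dict.getD LITERAL_MASK lit 0)) (k : Int)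
      = ((k ||| MN cs : Nat) : Int) := by
  induction cs generalizing k with
  | nil => simp [MN, AFn]
  | cons l cs ih =>
    have hl : l ∈ VALID := hpre l (by simp)
    have hrest : ∀ l' ∈ cs, l' ∈ VALID := fun l' h => hpre l' (by simp [h])
    rw [List.foldl_cons, getD_eq l hl, PySem.Int.bor_natCast, ih hrest]
    congr 1
    fin_cases hl <;>
    · simp only [MN, AFn, List.mem_cons, pnat]
      by_cases h1 : "x1" ∈ cs <;> by_cases h2 : "-x1" ∈ cs <;> by_cases h3 : "x2" ∈ cs <;>
        by_cases h4 : "-x2" ∈ cs <;> by_cases h5 : "x3" ∈ cs <;> by_cases h6 : "-x3" ∈ cs <;>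
        simp [h1, h2, h3, h4, h5, h6, Nat.lor_assoc, Nat.lor_comm, lor_left_comm]

theorem any_sat (clause : List String) (i : Int) (hpre : ∀ l ∈ clause, l ∈ VALID) :
    clause.any (fun lit => satLit lit i)
      = (decide ("x1" ∈ clause) && satLit "x1" i || decide ("-x1" ∈ clause) && satLit "-x1" i ||
         decide ("x2" ∈ clause) && satLit "x2" i || decide ("-x2" ∈ clause) && satLit "-x2" i ||
         decide ("x3" ∈ clause) && satLit "x3" i || decide ("-x3" ∈ clause) && satLit "-x3" i) := by
  induction clause with
  | nil => simp
  | cons l cs ih =>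
    have hl : l ∈ VALID := hpre l (by simp)
    have hrest : ∀ l' ∈ cs, l' ∈ VALID := fun l' h => hpre l' (by simp [h])
    rw [List.any_cons, ih hrest]
    fin_cases hl <;>
    · simp only [List.mem_cons]
      cases hs : satLit "x1" i <;> cases hs2 : satLit "-x1" i <;>
        cases hs3 : satLit "x2" i <;> cases hs4 : satLit "-x2" i <;>
        cases hs5 : satLit "x3" i <;> cases hs6 : satLit "-x3" i <;>
        simp [hs, hs2, hs3, hs4, hs5, hs6]

theorem pyRange8 : PySem.List.pyRange 0 8 1 = ([0, 1, 2, 3, 4, 5, 6, 7] : List Int) := by decide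

theorem A_char (clause : List String) (hpre : ∀ l ∈ clause, l ∈ VALID) :
    clause_mask clause
      = AF (decide ("x1" ∈ clause)) (decide ("-x1" ∈ clause)) (decide ("x2" ∈ clause))
           (decide ("-x2" ∈ clause)) (decide ("x3" ∈ clause)) (decide ("-x3" ∈ clause)) := by
  have h := A_fold clause hpre 0
  rw [Nat.cast_zero] at h
  unfold clause_mask AF
  rw [h]
  simp [MN]

theorem B_char (clause : List String) (hpre : ∀ l ∈ clause, l ∈ VALID) :
    clause_mask_alt clause
      = BF (decide ("x1" ∈ clause)) (decide ("-x1" ∈ clause)) (decide ("x2" ∈ clause))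
           (decide ("-x2" ∈ clause)) (decide ("x3" ∈ clause)) (decide ("-x3" ∈ clause)) := by
  unfold clause_mask_alt BF
  have hall : clause.all (fun lit => decide (lit ∈ VALID)) = true := by
    simp only [List.all_eq_true, decide_eq_true_eq]; exact hpre
  rw [if_pos hall, pyRange8]
  simp only [List.foldl_cons, List.foldl_nil, any_sat clause _ hpre]

-- ===== VERDICT (by name: the statement is the Claim_ definition above) =====
theorem clause_mask_spec : Claim_equal_clause_mask := by
  intro clause _ hpre
  unfold Spec_clause_mask
  rw [A_char clause hpre, B_char clause hpre, AF_eq_BF]
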